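-- pv_equiv track=rewrite | github.com/txemac/sentenceToHashtag | sentenceToHashtag.py | sentence_to_hashtag
-- ===== SOURCE A (Python) =====
-- from string import ascii_letters
--
-- def sentence_to_hashtag(sentence):
--     """
--     This function convert a sentence in a hashtag.
--     Non-alphabetic characters are ignored.
--     E.g. 'thi9s Is &&So cool' -> '#ThisIsSoCool'.
--     :param sentence: sentence
--     :return: hashtag
--     """
--     result = None
--
--     if sentence and type(sentence) is str:
--         result = '#'
--
--         for word in sentence.split():
--             # clean non-alphabetic characters
--             aux = "".join([ch for ch in word if ch in ascii_letters])
--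
--             # add capitalize word
--             result += aux.title()
--
--     if result == '#':
--         result = None
--
--     return result
-- ===== SOURCE B (Python) =====
-- from string import ascii_letters
--
-- def sentence_to_hashtag(sentence):
--     result = None
--     if sentence and type(sentence) is str:
--         result = '#'
--         at_word_start = True
--         for ch in sentence:
--             if ch.isspace():
--                 at_word_start = True
--             elif ch in ascii_letters:
--                 result += ch.upper() if at_word_start else ch.lower()
--                 at_word_start = False
--     if result == '#':
--         result = None
--     return result
-- ===== Notes on version B (the rewrite author's own statement) =====
-- stated objective: alternative
-- what changed: Replaced A's split-into-words / per-word filter-and-title / concatenate pipeline by a single flat left-to-right pass over the characters with an at_word_start flag (whitespace sets it, a letter emits upper/lower case and clears it, other characters are skipped).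
import Mathlib
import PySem

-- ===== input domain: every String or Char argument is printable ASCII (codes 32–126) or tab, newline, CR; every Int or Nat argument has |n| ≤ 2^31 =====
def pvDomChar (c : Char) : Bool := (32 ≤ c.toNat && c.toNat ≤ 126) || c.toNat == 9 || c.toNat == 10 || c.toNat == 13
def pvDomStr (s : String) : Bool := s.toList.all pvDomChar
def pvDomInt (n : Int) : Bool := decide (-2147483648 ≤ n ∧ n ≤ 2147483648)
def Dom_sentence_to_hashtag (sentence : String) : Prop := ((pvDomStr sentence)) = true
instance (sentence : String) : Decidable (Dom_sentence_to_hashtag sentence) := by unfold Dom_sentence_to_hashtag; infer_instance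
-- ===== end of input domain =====

-- B replaces A's split/filter/title word pipeline by one flat left-to-right character pass
-- with an at-word-start flag (objective: alternative decomposition, same cost).


-- ===== PORT A =====
-- str.title() on a cased-flag pass; exact for ASCII strings (here it is only ever applied
-- to strings of ASCII letters, where Python's "cased" = isalpha).
def pyTitleGo : Bool → List Char → List Char
  | _, [] => []
  | prevCased, c :: cs =>
    if PySem.Chars.isalpha c then
      (if prevCased then PySem.Chars.lowerChar c else PySem.Chars.upperChar c) :: pyTitleGo true cs
    else c :: pyTitleGo false cs

-- 'ch in ascii_letters' is exactly PySem.Chars.isalpha (= isupper || islower, the ASCII ranges).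
-- The result string is carried as a List Char; type(sentence) is str is always true here.
def sentence_to_hashtag (sentence : String) : Option String :=
  if sentence ≠ "" then
    let result : List Char :=
      (PySem.Str.split₀ sentence).foldl
        (fun r w => r ++ pyTitleGo false (w.toList.filter PySem.Chars.isalpha)) ['#']
    if result = ['#'] then none else some (String.ofList result)
  else none

-- ===== PORT B =====
-- single pass, state = (result chars, at_word_start)
def sentence_to_hashtag_alt (sentence : String) : Option String :=
  if sentence ≠ "" then
    let st : List Char × Bool :=
      sentence.toList.foldl
        (fun st ch =>
          if PySem.Chars.isspace ch then (st.1, true)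
          else if PySem.Chars.isalpha ch then
            (st.1 ++ [if st.2 then PySem.Chars.upperChar ch else PySem.Chars.lowerChar ch], false)
          else st)
        (['#'], true)
    if st.1 = ['#'] then none else some (String.ofList st.1)
  else none

-- ===== PRECONDITION & SPEC =====
def Spec_sentence_to_hashtag (sentence : String) (out : Option String) : Prop := out = sentence_to_hashtag_alt sentence
instance (sentence : String) (out : Option String) : Decidable (Spec_sentence_to_hashtag sentence out) := by unfold Spec_sentence_to_hashtag; infer_instance

-- ===== CLAIM (what is proved, stated in full; the proofs are below) =====
def Claim_equal_sentence_to_hashtag : Prop := ∀ (sentence : String), Dom_sentence_to_hashtag sentence → Spec_sentence_to_hashtag sentence (sentence_to_hashtag sentence)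

-- ===== LEMMAS AND PROOFS =====

-- the common camel-case core, B's pass as a structural recursion
def camelGo : Bool → List Char → List Char
  | _, [] => []
  | b, c :: cs =>
    if PySem.Chars.isspace c then camelGo true cs
    else if PySem.Chars.isalpha c then
      (if b then PySem.Chars.upperChar c else PySem.Chars.lowerChar c) :: camelGo false cs
    else camelGo b cs

def wordT (w : List Char) : List Char := pyTitleGo false (w.filter PySem.Chars.isalpha)

theorem bfold_eq_camelGo (cs : List Char) : ∀ (r : List Char) (b : Bool),
    (cs.foldl (fun st ch =>
        if PySem.Chars.isspace ch then (st.1, true)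
        else if PySem.Chars.isalpha ch then
          (st.1 ++ [if st.2 then PySem.Chars.upperChar ch else PySem.Chars.lowerChar ch], false)
        else st) (r, b)).1 = r ++ camelGo b cs := by
  induction cs with
  | nil => intro r b; simp [camelGo]
  | cons c cs ih =>
    intro r b
    by_cases hs : PySem.Chars.isspace c = true
    · simp [camelGo, hs, ih]
    · by_cases ha : PySem.Chars.isalpha c = true
      · simp [camelGo, hs, ha, ih]
      · simp [camelGo, hs, ha, ih]

theorem title_snoc (xs : List Char) : ∀ (b : Bool) (c : Char),
    (∀ x ∈ xs, PySem.Chars.isalpha x = true) → PySem.Chars.isalpha c = true →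
    pyTitleGo b (xs ++ [c]) =
      pyTitleGo b xs ++ [if xs.isEmpty && !b then PySem.Chars.upperChar c else PySem.Chars.lowerChar c] := by
  induction xs with
  | nil =>
    intro b c _ hc
    cases b <;> simp [pyTitleGo, hc]
  | cons x xs ih =>
    intro b c hall hc
    have hx : PySem.Chars.isalpha x = true := hall x (by simp)
    have := ih true c (fun y hy => hall y (by simp [hy])) hc
    simp [pyTitleGo, hx, this]

theorem foldl_append_flatten (L : List (List Char)) (f : List Char → List Char) :
    ∀ (i : List Char), L.foldl (fun r w => r ++ f w) i = i ++ (L.map f).flatten := by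
  induction L with
  | nil => intro i; simp
  | cons w L ih => intro i; simp [ih]

theorem goFlat (cs : List Char) : ∀ (cur : List Char) (acc : List (List Char)),
    ((PySem.Chars.split₀.go cs cur acc).map wordT).flatten
      = ((acc.reverse.map wordT).flatten)
        ++ pyTitleGo false (cur.reverse.filter PySem.Chars.isalpha)
        ++ camelGo (cur.reverse.filter PySem.Chars.isalpha).isEmpty cs := by
  induction cs with
  | nil =>
    intro cur acc
    by_cases h : cur.isEmpty = true
    · have : cur = [] := List.isEmpty_iff.mp h
      simp [PySem.Chars.split₀.go, this, pyTitleGo, camelGo]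
    · simp [PySem.Chars.split₀.go, h, camelGo, wordT]
  | cons c cs ih =>
    intro cur acc
    by_cases hs : PySem.Chars.isspace c = true
    · by_cases h : cur.isEmpty = true
      · have hcur : cur = [] := List.isEmpty_iff.mp h
        simp [PySem.Chars.split₀.go, hcur, hs, pyTitleGo, camelGo, ih]
      · simp only [PySem.Chars.split₀.go, hs, h, if_true, if_false, Bool.false_eq_true, ih]
        simp [camelGo, hs, wordT, pyTitleGo]
    · by_cases ha : PySem.Chars.isalpha c = true
      · have hall : ∀ x ∈ (cur.filter PySem.Chars.isalpha).reverse, PySem.Chars.isalpha x = true := by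
          intro x hx; exact List.of_mem_filter (List.mem_reverse.mp hx)
        have hsnoc := title_snoc ((cur.filter PySem.Chars.isalpha).reverse) false c hall ha
        simp only [PySem.Chars.split₀.go, hs, if_false, Bool.false_eq_true, ih]
        simp only [List.reverse_cons, List.filter_append, List.filter_reverse]
        simp [ha, camelGo, hs, hsnoc]
        rw [List.isEmpty_eq_false_iff.mpr (by simp)]
      · simp only [PySem.Chars.split₀.go, hs, if_false, Bool.false_eq_true, ih]
        simp [List.filter_append, ha, camelGo, hs]

theorem core_eq (cs : List Char) :
    ((PySem.Chars.split₀ cs).map wordT).flatten = camelGo true cs := by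
  have := goFlat cs [] []
  simpa [PySem.Chars.split₀, pyTitleGo] using this

-- ===== VERDICT (by name: the statement is the Claim_ definition above) =====
theorem sentence_to_hashtag_spec : Claim_equal_sentence_to_hashtag := by
  intro sentence _
  unfold Spec_sentence_to_hashtag sentence_to_hashtag sentence_to_hashtag_alt
  by_cases h : sentence = ""
  · simp [h]
  · simp only [h, ne_eq, not_false_eq_true, if_true]
    have hA : (PySem.Str.split₀ sentence).foldl
        (fun r w => r ++ pyTitleGo false (w.toList.filter PySem.Chars.isalpha)) ['#']
        = ['#'] ++ camelGo true sentence.toList := by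
      have hmap : (PySem.Str.split₀ sentence).foldl
          (fun r w => r ++ pyTitleGo false (w.toList.filter PySem.Chars.isalpha)) ['#']
          = ((PySem.Str.split₀ sentence).map String.toList).foldl
              (fun r w => r ++ wordT w) ['#'] := by
        rw [List.foldl_map]; rfl
      rw [hmap, PySem.Str.split₀_map_toList, foldl_append_flatten, core_eq]
    rw [hA, bfold_eq_camelGo]
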